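-- pv_equiv track=rewrite | github.com/KelSolaar/histoire-de-france | scripts/verify_sources.py | find_line_range_for_text
-- ===== SOURCE A (Python) =====
-- def normalize_whitespace(text: str) -> str:
--     """Collapse all whitespace to single spaces."""
--     return " ".join(text.split())
--
-- def find_line_range_for_text(
--     needle: str, lines: list[str]
-- ) -> tuple[int, int] | None:
--     """
--     Find the tightest line range containing the needle text.
--
--     Returns (line_start, line_end) as 1-indexed, or None if not found.
--     """
--     norm_needle = normalize_whitespace(needle)
--
--     # Build a mapping: for each line, accumulate the running text
--     # so we can find which lines contain the needle
--     running = ""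
--     line_positions: list[tuple[int, int]] = []  # (start_pos, end_pos) in running
--     for i, line in enumerate(lines):
--         stripped = line.strip()
--         if not stripped:
--             line_positions.append((len(running), len(running)))
--             continue
--         start = len(running)
--         if running:
--             running += " "
--             start = len(running)
--         running += stripped
--         line_positions.append((start, len(running)))
--
--     pos = running.find(norm_needle)
--     if pos == -1:
--         return None
--
--     needle_end = pos + len(norm_needle)
--
--     # Find first and last line that overlaps with the needle
--     first_line = None
--     last_line = None
--     for i, (ls, le) in enumerate(line_positions):
--         if le > pos and ls < needle_end:
--             if first_line is None:
--                 first_line = i + 1  # 1-indexed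
--             last_line = i + 1
--
--     if first_line is None:
--         return None
--
--     return (first_line, last_line)
-- ===== SOURCE B (Python) =====
-- def find_line_range_for_text(
--     needle: str, lines: list[str]
-- ) -> tuple[int, int] | None:
--     """
--     Find the tightest line range containing the needle text.
--
--     Returns (line_start, line_end) as 1-indexed, or None if not found.
--
--     Instead of recording a (start, end) interval per line and scanning all
--     intervals for overlap, build a parallel char->line table while
--     concatenating, then answer with two direct lookups.
--     """
--     norm_needle = " ".join(needle.split())
--
--     running = ""
--     line_of: list[int] = []  # 1-indexed source line of each char of running
--     for i, line in enumerate(lines):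
--         stripped = line.strip()
--         if not stripped:
--             continue
--         if running:
--             running += " "
--             line_of.append(i + 1)  # joining space: charge to the line after it
--         running += stripped
--         line_of.extend([i + 1] * len(stripped))
--
--     if not norm_needle:
--         return None
--     pos = running.find(norm_needle)
--     if pos == -1:
--         return None
--     return (line_of[pos], line_of[pos + len(norm_needle) - 1])
-- ===== Notes on version B (the rewrite author's own statement) =====
-- stated objective: simpler
-- what changed: B replaces A's per-line (start,end) interval list and the final overlap scan over all intervals with a parallel char->line table filled while concatenating, answering with two direct lookups at the match's first and last character.
import Mathlib
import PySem

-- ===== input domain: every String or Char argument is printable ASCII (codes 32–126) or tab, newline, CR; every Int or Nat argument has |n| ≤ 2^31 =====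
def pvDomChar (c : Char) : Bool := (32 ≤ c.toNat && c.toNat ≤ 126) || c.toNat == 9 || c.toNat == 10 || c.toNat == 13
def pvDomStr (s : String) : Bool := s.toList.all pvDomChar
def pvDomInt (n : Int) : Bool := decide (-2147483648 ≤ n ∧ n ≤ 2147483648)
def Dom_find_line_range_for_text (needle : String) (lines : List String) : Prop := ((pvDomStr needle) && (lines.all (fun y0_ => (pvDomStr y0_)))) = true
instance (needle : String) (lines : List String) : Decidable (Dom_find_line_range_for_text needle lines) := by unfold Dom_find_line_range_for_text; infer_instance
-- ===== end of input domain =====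

-- B replaces A's per-line (start,end) interval list and its final overlap scan by a parallel
-- char->line table filled while concatenating, answered by two direct lookups (objective: simpler).

-- ===== PORT A =====
def normalize_whitespace (text : String) : String :=
  PySem.Str.join " " (PySem.Str.split₀ text)

-- the build loop of A: for line in lines: … accumulating (running, line_positions)
def pvBuildA : List String → List Char × List (Nat × Nat) → List Char × List (Nat × Nat)
  | [], st => st
  | line :: rest, (running, lps) =>
    let stripped := PySem.Chars.strip line.toList
    if stripped.isEmpty then
      pvBuildA rest (running, lps ++ [(running.length, running.length)])
    else
      let start := running.length
      let rs : List Char × Nat :=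
        if running.isEmpty then (running, start) else (running ++ [' '], (running ++ [' ']).length)
      let running := rs.1 ++ stripped
      pvBuildA rest (running, lps ++ [(rs.2, running.length)])

-- the overlap-scan loop of A: for i, (ls, le) in enumerate(line_positions): …
def pvScanA : List (Nat × Nat) → Nat → Int → Int → Option Int × Option Int → Option Int × Option Int
  | [], _, _, _, acc => acc
  | (ls, le) :: rest, i, pos, nend, (first, last) =>
    if (le : Int) > pos ∧ (ls : Int) < nend then
      pvScanA rest (i + 1) pos nend
        ((if first = none then some ((i : Int) + 1) else first), some ((i : Int) + 1))
    else
      pvScanA rest (i + 1) pos nend (first, last)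

def find_line_range_for_text (needle : String) (lines : List String) : Option (Int × Int) :=
  let norm_needle := (normalize_whitespace needle).toList
  let st := pvBuildA lines ([], [])
  let running := st.1
  let line_positions := st.2
  let pos := PySem.Chars.find running norm_needle
  if pos = -1 then none
  else
    let needle_end := pos + (norm_needle.length : Int)
    match pvScanA line_positions 0 pos needle_end (none, none) with
    | (none, _) => none
    | (some f, last) =>
      match last with
      | some l => some (f, l)
      | none => none

-- ===== PORT B =====
-- the build loop of B: same concatenation, but fills the char->line table line_of
def pvBuildB : List String → Nat → List Char × List Nat → List Char × List Nat
  | [], _, st => st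
  | line :: rest, i, (running, lineOf) =>
    let stripped := PySem.Chars.strip line.toList
    if stripped.isEmpty then
      pvBuildB rest (i + 1) (running, lineOf)
    else
      let rs : List Char × List Nat :=
        if running.isEmpty then (running, lineOf) else (running ++ [' '], lineOf ++ [i + 1])
      pvBuildB rest (i + 1) (rs.1 ++ stripped, rs.2 ++ List.replicate stripped.length (i + 1))

def find_line_range_for_text_alt (needle : String) (lines : List String) : Option (Int × Int) :=
  let norm := (PySem.Str.join " " (PySem.Str.split₀ needle)).toList
  let st := pvBuildB lines 0 ([], [])
  let running := st.1
  let lineOf := st.2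
  if norm.isEmpty then none
  else
    let pos := PySem.Chars.find running norm
    if pos = -1 then none
    else
      some (((PySem.List.pyGetD lineOf pos 0 : Nat) : Int),
            ((PySem.List.pyGetD lineOf (pos + (norm.length : Int) - 1) 0 : Nat) : Int))

-- ===== PRECONDITION & SPEC =====
def Spec_find_line_range_for_text (needle : String) (lines : List String) (out : Option (Int × Int)) : Prop := out = find_line_range_for_text_alt needle lines
instance (needle : String) (lines : List String) (out : Option (Int × Int)) : Decidable (Spec_find_line_range_for_text needle lines out) := by unfold Spec_find_line_range_for_text; infer_instance

-- ===== CLAIM (what is proved, stated in full; the proofs are below) =====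
def Claim_equal_find_line_range_for_text : Prop := ∀ (needle : String) (lines : List String), Dom_find_line_range_for_text needle lines → Spec_find_line_range_for_text needle lines (find_line_range_for_text needle lines)

-- ===== LEMMAS AND PROOFS =====

theorem pvScanA_append (l1 l2 : List (Nat × Nat)) (i : Nat) (pos nend : Int)
    (acc : Option Int × Option Int) :
    pvScanA (l1 ++ l2) i pos nend acc = pvScanA l2 (i + l1.length) pos nend (pvScanA l1 i pos nend acc) := by
  induction l1 generalizing i acc with
  | nil => simp [pvScanA]
  | cons e rest ih =>
    obtain ⟨ls, le⟩ := e
    obtain ⟨f, l⟩ := acc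
    simp only [List.cons_append, pvScanA, List.length_cons]
    split
    · rw [ih]; congr 1; omega
    · rw [ih]; congr 1; omega

theorem pvScanA_fail (l : List (Nat × Nat)) (i : Nat) (pos nend : Int)
    (acc : Option Int × Option Int)
    (h : ∀ e ∈ l, ¬(((e.2 : Int)) > pos ∧ ((e.1 : Int)) < nend)) :
    pvScanA l i pos nend acc = acc := by
  induction l generalizing i with
  | nil => rfl
  | cons e rest ih =>
    obtain ⟨ls, le⟩ := e
    obtain ⟨f, last⟩ := acc
    simp only [pvScanA]
    split
    · exact absurd (by assumption) (h (ls, le) (by simp))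
    · exact ih (i + 1) (fun e he => h e (by simp [he]))

theorem pvScanA_succ_some (l : List (Nat × Nat)) (i : Nat) (pos nend : Int) (f m : Int)
    (h : ∀ e ∈ l, ((e.2 : Int)) > pos ∧ ((e.1 : Int)) < nend) :
    pvScanA l i pos nend (some f, some m) =
      (some f, some (if l.isEmpty then m else ((i + l.length : Nat) : Int))) := by
  induction l generalizing i m with
  | nil => rfl
  | cons e rest ih =>
    obtain ⟨ls, le⟩ := e
    simp only [pvScanA]
    split
    · rw [if_neg (by simp), ih (i + 1) _ (fun e he => h e (by simp [he]))]
      rcases rest with _ | ⟨e', rest'⟩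
      · simp
      · simp only [List.isEmpty_cons, List.length_cons]
        rw [if_neg (by simp)]
        norm_num
        omega
    · exact absurd (h (ls, le) (by simp)) (by assumption)

theorem pvScanA_succ (l : List (Nat × Nat)) (i : Nat) (pos nend : Int) (l0 : Option Int)
    (hne : l ≠ [])
    (h : ∀ e ∈ l, ((e.2 : Int)) > pos ∧ ((e.1 : Int)) < nend) :
    pvScanA l i pos nend (none, l0) = (some ((i : Int) + 1), some ((i + l.length : Nat) : Int)) := by
  rcases l with _ | ⟨⟨ls, le⟩, rest⟩
  · exact absurd rfl hne
  · simp only [pvScanA]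
    split
    · rw [if_pos (by simp), pvScanA_succ_some rest (i + 1) pos nend _ _ (fun e he => h e (by simp [he]))]
      rcases rest with _ | ⟨e', rest'⟩
      · simp
      · simp only [List.isEmpty_cons, List.length_cons]
        rw [if_neg (by simp)]
        norm_num
        omega
    · exact absurd (h (ls, le) (by simp)) (by assumption)

theorem pvScanA_window (lps : List (Nat × Nat)) (pos nend : Int) (j k : Nat)
    (hk : k < lps.length) (hjk : j ≤ k)
    (hP : ∀ t (ht : t < lps.length),
      (((lps[t].2 : Int)) > pos ∧ ((lps[t].1 : Int)) < nend) ↔ (j ≤ t ∧ t ≤ k)) :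
    pvScanA lps 0 pos nend (none, none) = (some ((j : Int) + 1), some ((k : Int) + 1)) := by
  have hj : j < lps.length := lt_of_le_of_lt hjk hk
  have htl : (lps.take j).length = j := by rw [List.length_take]; omega
  have hml : ((lps.drop j).take (k + 1 - j)).length = k + 1 - j := by
    rw [List.length_take, List.length_drop]; omega
  have hdec : lps.take j ++ ((lps.drop j).take (k + 1 - j) ++ lps.drop (k + 1)) = lps := by
    have h1 : lps.drop (k + 1) = (lps.drop j).drop (k + 1 - j) := by
      rw [List.drop_drop]; congr 1; omega
    rw [h1, List.take_append_drop, List.take_append_drop]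
  conv_lhs => rw [← hdec]
  rw [pvScanA_append, pvScanA_fail (lps.take j) _ _ _ _ ?hfail1, pvScanA_append,
    pvScanA_succ _ _ _ _ _ ?hne ?hsucc, pvScanA_fail _ _ _ _ _ ?hfail2]
  case hfail1 =>
    intro e he
    obtain ⟨t, ht, rfl⟩ := List.mem_iff_getElem.mp he
    rw [List.getElem_take]
    have ht' : t < j := by omega
    intro hc
    exact absurd ((hP t (by omega)).mp hc).1 (by omega)
  case hne => intro hnil; rw [hnil] at hml; simp at hml; omega
  case hsucc =>
    intro e he
    obtain ⟨t, ht, rfl⟩ := List.mem_iff_getElem.mp he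
    rw [List.getElem_take, List.getElem_drop]
    exact (hP (j + t) (by omega)).mpr ⟨by omega, by omega⟩
  case hfail2 =>
    intro e he
    obtain ⟨t, ht, rfl⟩ := List.mem_iff_getElem.mp he
    rw [List.length_drop] at ht
    rw [List.getElem_drop]
    intro hc
    exact absurd ((hP (k + 1 + t) (by omega)).mp hc).2 (by omega)
  rw [htl, hml]
  have hc1 : ((0 + j + (k + 1 - j) : Nat) : Int) = (k : Int) + 1 := by omega
  have hc2 : (0 + j : Nat) = j := by omega
  rw [hc1, hc2]

def pvInv (run : List Char) (lps : List (Nat × Nat)) (lof : List Nat) : Prop :=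
  lof.length = run.length ∧
  (∀ j (hj : j < lps.length), lps[j].1 ≤ lps[j].2 ∧ lps[j].2 ≤ run.length) ∧
  (∀ j j' (hj : j < lps.length) (hj' : j' < lps.length), j < j' → lps[j].2 ≤ lps[j'].1) ∧
  (∀ j (hj : j < lps.length), ∀ c, lps[j].1 ≤ c → c < lps[j].2 → lof[c]? = some (j + 1)) ∧
  (∀ c (hc : c < run.length),
      (∃ j, ∃ (hj : j < lps.length), lps[j].1 ≤ c ∧ c < lps[j].2) ∨ run[c] = ' ')

theorem pvBuild_inv : ∀ (lines : List String) (run : List Char) (lps : List (Nat × Nat)) (lof : List Nat),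
    pvInv run lps lof →
    (pvBuildA lines (run, lps)).1 = (pvBuildB lines lps.length (run, lof)).1 ∧
    pvInv (pvBuildA lines (run, lps)).1 (pvBuildA lines (run, lps)).2 (pvBuildB lines lps.length (run, lof)).2 := by
  intro lines
  induction lines with
  | nil => intro run lps lof h; exact ⟨rfl, h⟩
  | cons line rest ih =>
    intro run lps lof h
    obtain ⟨h1, h2, h3, h4, h5⟩ := h
    simp only [pvBuildA, pvBuildB]
    by_cases hs : (PySem.Chars.strip line.toList).isEmpty
    · rw [if_pos hs, if_pos hs]
      have hlen : (lps ++ [(run.length, run.length)]).length = lps.length + 1 := by simp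
      have hnew : pvInv run (lps ++ [(run.length, run.length)]) lof := by
        refine ⟨h1, ?_, ?_, ?_, ?_⟩
        · intro j hj
          rcases Nat.lt_or_ge j lps.length with hlt | hge
          · simp only [List.getElem_append_left hlt]; exact h2 j hlt
          · have hje : j = lps.length := by simp at hj; omega
            subst hje
            simp
        · intro j j' hj hj' hjj
          rcases Nat.lt_or_ge j' lps.length with hlt | hge
          · have hjl : j < lps.length := by omega
            simp only [List.getElem_append_left hlt, List.getElem_append_left hjl]
            exact h3 j j' hjl hlt hjj
          · have hje : j' = lps.length := by simp at hj'; omega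
            subst hje
            have hjl : j < lps.length := by omega
            simp only [List.getElem_append_left hjl, List.getElem_append_right (le_refl _)]
            simpa using (h2 j hjl).2
        · intro j hj c hc1 hc2
          rcases Nat.lt_or_ge j lps.length with hlt | hge
          · simp only [List.getElem_append_left hlt] at hc1 hc2
            exact h4 j hlt c hc1 hc2
          · have hje : j = lps.length := by simp at hj; omega
            subst hje
            simp only [List.getElem_append_right (le_refl _)] at hc1 hc2
            simp at hc1 hc2; omega
        · intro c hc
          rcases h5 c hc with ⟨j, hj, hcc⟩ | hsp
          · exact Or.inl ⟨j, by simp; omega, by simpa [List.getElem_append_left hj] using hcc⟩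
          · exact Or.inr hsp
      have := ih run (lps ++ [(run.length, run.length)]) lof hnew
      rw [hlen] at this
      exact this
    · rw [if_neg hs, if_neg hs]
      have hsne : PySem.Chars.strip line.toList ≠ [] := by simpa using hs
      by_cases hr : run.isEmpty
      · -- running is empty: run = [], lof = []
        have hrun : run = [] := List.isEmpty_iff.mp hr
        subst hrun
        have hlof : lof = [] := List.length_eq_zero_iff.mp (by simpa using h1)
        subst hlof
        simp only [if_pos hr, List.nil_append, List.length_nil]
        have hnew : pvInv (PySem.Chars.strip line.toList)
            (lps ++ [(0, (PySem.Chars.strip line.toList).length)])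
            (List.replicate (PySem.Chars.strip line.toList).length (lps.length + 1)) := by
          have hemp : ∀ j (hj : j < lps.length), lps[j].2 = 0 := by
            intro j hj; have := (h2 j hj).2; simpa using this
          refine ⟨by simp, ?_, ?_, ?_, ?_⟩
          · intro j hj
            rcases Nat.lt_or_ge j lps.length with hlt | hge
            · simp only [List.getElem_append_left hlt]
              have := (h2 j hlt).1
              have := hemp j hlt
              omega
            · have hje : j = lps.length := by simp at hj; omega
              subst hje
              simp
          · intro j j' hj hj' hjj
            rcases Nat.lt_or_ge j' lps.length with hlt | hge
            · have hjl : j < lps.length := by omega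
              simp only [List.getElem_append_left hlt, List.getElem_append_left hjl]
              exact h3 j j' hjl hlt hjj
            · have hje : j' = lps.length := by simp at hj'; omega
              subst hje
              have hjl : j < lps.length := by omega
              simp only [List.getElem_append_left hjl, List.getElem_append_right (le_refl _)]
              simp [hemp j hjl]
          · intro j hj c hc1 hc2
            rcases Nat.lt_or_ge j lps.length with hlt | hge
            · simp only [List.getElem_append_left hlt] at hc1 hc2
              have := hemp j hlt; omega
            · have hje : j = lps.length := by simp at hj; omega
              subst hje
              simp only [List.getElem_append_right (le_refl _)] at hc1 hc2
              simp at hc1 hc2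
              rw [List.getElem?_eq_getElem (by simpa using hc2)]
              simp
          · intro c hc
            refine Or.inl ⟨lps.length, by simp, ?_⟩
            simp only [List.getElem_append_right (le_refl _)]
            simpa using hc
        have key := ih (PySem.Chars.strip line.toList)
            (lps ++ [(0, (PySem.Chars.strip line.toList).length)])
            (List.replicate (PySem.Chars.strip line.toList).length (lps.length + 1)) hnew
        have hL : (lps ++ [(0, (PySem.Chars.strip line.toList).length)]).length = lps.length + 1 := by
          simp
        rw [hL] at key
        exact key
      · -- running nonempty: append separator then the stripped line
        simp only [if_neg hr]
        have hn : run ≠ [] := by simpa using hr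
        have hnew : pvInv ((run ++ [' ']) ++ PySem.Chars.strip line.toList)
            (lps ++ [((run ++ [' ']).length, ((run ++ [' ']) ++ PySem.Chars.strip line.toList).length)])
            ((lof ++ [lps.length + 1]) ++ List.replicate (PySem.Chars.strip line.toList).length (lps.length + 1)) := by
          refine ⟨by simp [h1], ?_, ?_, ?_, ?_⟩
          · intro j hj
            rcases Nat.lt_or_ge j lps.length with hlt | hge
            · simp only [List.getElem_append_left hlt]
              have := h2 j hlt
              simp only [List.length_append, List.length_cons, List.length_nil]
              omega
            · have hje : j = lps.length := by simp at hj; omega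
              subst hje
              simp
          · intro j j' hj hj' hjj
            rcases Nat.lt_or_ge j' lps.length with hlt | hge
            · have hjl : j < lps.length := by omega
              simp only [List.getElem_append_left hlt, List.getElem_append_left hjl]
              exact h3 j j' hjl hlt hjj
            · have hje : j' = lps.length := by simp at hj'; omega
              subst hje
              have hjl : j < lps.length := by omega
              simp only [List.getElem_append_left hjl, List.getElem_append_right (le_refl _)]
              have := (h2 j hjl).2
              simp only [List.length_append, List.length_cons, List.length_nil]
              simp
              omega
          · intro j hj c hc1 hc2
            rcases Nat.lt_or_ge j lps.length with hlt | hge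
            · simp only [List.getElem_append_left hlt] at hc1 hc2
              have hcl : c < lof.length := by
                have := (h2 j hlt).2
                rw [h1]
                omega
              rw [List.getElem?_append_left (by simp; omega),
                List.getElem?_append_left hcl]
              exact h4 j hlt c hc1 hc2
            · have hje : j = lps.length := by simp at hj; omega
              subst hje
              simp only [List.getElem_append_right (le_refl _)] at hc1 hc2
              simp only [List.length_append, List.length_cons, List.length_nil] at hc1 hc2
              simp at hc1 hc2
              rw [List.getElem?_append_right (by simp [h1]; omega)]
              rw [List.getElem?_eq_getElem (by simp [h1]; omega)]
              simp
          · intro c hc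
            simp only [List.length_append, List.length_cons, List.length_nil] at hc
            rcases Nat.lt_or_ge c run.length with hcl | hcg
            · rcases h5 c hcl with ⟨j, hj, hcc⟩ | hsp
              · refine Or.inl ⟨j, by simp; omega, ?_⟩
                simpa [List.getElem_append_left hj] using hcc
              · refine Or.inr ?_
                rw [List.getElem_append_left (by simp; omega), List.getElem_append_left hcl]
                exact hsp
            · rcases Nat.eq_or_lt_of_le hcg with hceq | hcgt
              · refine Or.inr ?_
                rw [List.getElem_append_left (as := run ++ [' ']) (by simp; omega)]
                subst hceq
                simp
              · refine Or.inl ⟨lps.length, by simp, ?_⟩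
                simp only [List.getElem_append_right (le_refl _)]
                simp
                omega
        have key := ih ((run ++ [' ']) ++ PySem.Chars.strip line.toList)
            (lps ++ [((run ++ [' ']).length, ((run ++ [' ']) ++ PySem.Chars.strip line.toList).length)])
            ((lof ++ [lps.length + 1]) ++ List.replicate (PySem.Chars.strip line.toList).length (lps.length + 1)) hnew
        have hL : (lps ++ [((run ++ [' ']).length, ((run ++ [' ']) ++ PySem.Chars.strip line.toList).length)]).length = lps.length + 1 := by
          simp
        rw [hL] at key
        exact key

theorem pvSplit_go_props : ∀ (s cur : List Char) (acc : List (List Char)),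
    (∀ c ∈ cur, PySem.Chars.isspace c = false) →
    (∀ t ∈ acc, t ≠ [] ∧ ∀ c ∈ t, PySem.Chars.isspace c = false) →
    ∀ t ∈ PySem.Chars.split₀.go s cur acc, t ≠ [] ∧ ∀ c ∈ t, PySem.Chars.isspace c = false := by
  intro s
  induction s with
  | nil =>
    intro cur acc hcur hacc t ht
    simp only [PySem.Chars.split₀.go] at ht
    split at ht
    · exact hacc t (by simpa using ht)
    · rcases (by simpa using ht : t ∈ acc ∨ t = cur.reverse) with h | h
      · exact hacc t h
      · subst h
        refine ⟨by simpa using List.isEmpty_eq_false_iff.mp (by simpa using (by assumption : ¬ cur.isEmpty = true)), ?_⟩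
        intro c hc; exact hcur c (by simpa using hc)
  | cons c rest ih =>
    intro cur acc hcur hacc t ht
    simp only [PySem.Chars.split₀.go] at ht
    split at ht
    · split at ht
      · exact ih [] acc (by simp) hacc t ht
      · refine ih [] _ (by simp) ?_ t ht
        intro u hu
        rcases List.mem_cons.mp hu with h | h
        · subst h
          refine ⟨by simpa using List.isEmpty_eq_false_iff.mp (by simpa using (by assumption : ¬ cur.isEmpty = true)), ?_⟩
          intro d hd; exact hcur d (by simpa using hd)
        · exact hacc u h
    · refine ih (c :: cur) acc ?_ hacc t ht
      intro d hd
      rcases List.mem_cons.mp hd with h | h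
      · subst h; simpa using (by assumption : ¬ PySem.Chars.isspace d = true)
      · exact hcur d h

theorem pvSplit_props : ∀ (s : List Char), ∀ t ∈ PySem.Chars.split₀ s,
    t ≠ [] ∧ ∀ c ∈ t, PySem.Chars.isspace c = false := by
  intro s
  exact pvSplit_go_props s [] [] (by simp) (by simp)

theorem pvJoin_ne_nil : ∀ (parts : List (List Char)), parts ≠ [] → (∀ t ∈ parts, t ≠ []) →
    PySem.Chars.join [' '] parts ≠ [] := by
  intro parts
  match parts with
  | [] => intro h; exact absurd rfl h
  | [a] => intro _ h; rw [PySem.Chars.join_singleton]; exact h a (by simp)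
  | a :: b :: l =>
    intro _ h
    rw [PySem.Chars.join_cons_cons]
    have := h a (by simp)
    simp [this]

theorem pvJoin_head : ∀ (parts : List (List Char)),
    (∀ t ∈ parts, t ≠ [] ∧ ∀ c ∈ t, PySem.Chars.isspace c = false) →
    ∀ c, (PySem.Chars.join [' '] parts).head? = some c → PySem.Chars.isspace c = false := by
  intro parts
  match parts with
  | [] => intro _ c hc; simp [PySem.Chars.join_nil] at hc
  | [a] =>
    intro h c hc
    rw [PySem.Chars.join_singleton] at hc
    exact (h a (by simp)).2 c (List.mem_of_mem_head? hc)
  | a :: b :: l =>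
    intro h c hc
    rw [PySem.Chars.join_cons_cons, List.head?_append_of_ne_nil (a ++ [' ']) (by simp),
      List.head?_append_of_ne_nil a ((h a (by simp)).1)] at hc
    exact (h a (by simp)).2 c (List.mem_of_mem_head? hc)

theorem pvJoin_last : ∀ (parts : List (List Char)),
    (∀ t ∈ parts, t ≠ [] ∧ ∀ c ∈ t, PySem.Chars.isspace c = false) →
    ∀ c, (PySem.Chars.join [' '] parts).getLast? = some c → PySem.Chars.isspace c = false := by
  intro parts
  induction parts with
  | nil => intro _ c hc; simp [PySem.Chars.join_nil] at hc
  | cons a rest ih =>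
    match rest with
    | [] =>
      intro h c hc
      rw [PySem.Chars.join_singleton] at hc
      exact (h a (by simp)).2 c (List.mem_of_mem_getLast? hc)
    | b :: l =>
      intro h c hc
      have hne : PySem.Chars.join [' '] (b :: l) ≠ [] :=
        pvJoin_ne_nil _ (by simp) (fun t ht => (h t (by simp [ht])).1)
      rw [PySem.Chars.join_cons_cons, List.append_assoc,
        List.getLast?_append_of_ne_nil a (by simp), List.getLast?_append_of_ne_nil [' '] hne] at hc
      exact ih (fun t ht => h t (by simp [ht])) c hc

theorem pv_norm_ends (needle : String) (c0 cL : Char)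
    (h0 : (PySem.Str.join " " (PySem.Str.split₀ needle)).toList.head? = some c0)
    (hL : (PySem.Str.join " " (PySem.Str.split₀ needle)).toList.getLast? = some cL) :
    PySem.Chars.isspace c0 = false ∧ PySem.Chars.isspace cL = false := by
  have hrw : (PySem.Str.join " " (PySem.Str.split₀ needle)).toList
      = PySem.Chars.join [' '] (PySem.Chars.split₀ needle.toList) := by
    simp [PySem.Str.toList_join, PySem.Str.split₀_map_toList]
  rw [hrw] at h0 hL
  exact ⟨pvJoin_head _ (pvSplit_props needle.toList) c0 h0,
    pvJoin_last _ (pvSplit_props needle.toList) cL hL⟩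

-- ===== VERDICT (by name: the statement is the Claim_ definition above) =====
theorem find_line_range_for_text_spec : Claim_equal_find_line_range_for_text := by
  intro needle lines _dom
  unfold Spec_find_line_range_for_text
  have hinv0 : pvInv [] [] [] :=
    ⟨rfl, by intro j hj; simp at hj, by intro j j' hj; simp at hj,
      by intro j hj; simp at hj, by intro c hc; simp at hc⟩
  have hkey := pvBuild_inv lines [] [] [] hinv0
  simp only [List.length_nil] at hkey
  simp only [find_line_range_for_text, find_line_range_for_text_alt, normalize_whitespace]
  obtain ⟨runA, lps, hA⟩ : ∃ r l, pvBuildA lines ([], []) = (r, l) := ⟨_, _, rfl⟩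
  obtain ⟨runB, lof, hB⟩ : ∃ r l, pvBuildB lines 0 ([], []) = (r, l) := ⟨_, _, rfl⟩
  rw [hA, hB] at hkey ⊢
  obtain ⟨hrun, hIv⟩ := hkey
  simp only at hrun hIv ⊢
  subst hrun
  obtain ⟨h1, h2, h3, h4, h5⟩ := hIv
  obtain ⟨norm, hnorm⟩ : ∃ n, (PySem.Str.join " " (PySem.Str.split₀ needle)).toList = n := ⟨_, rfl⟩
  rw [hnorm]
  by_cases hne : norm = []
  · -- empty needle: A finds it at 0 but no interval overlaps a width-0 window; B returns none directly
    rw [hne]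
    simp only [PySem.Chars.find_nil]
    rw [pvScanA_fail _ _ _ _ _ ?hfail]
    case hfail =>
      rintro e he ⟨hx1, hx2⟩
      simp at hx2
      omega
    simp
  · rw [if_neg (show ¬ norm.isEmpty = true by simpa using hne)]
    obtain ⟨pos, hpos⟩ : ∃ q, PySem.Chars.find runA norm = q := ⟨_, rfl⟩
    rw [hpos]
    by_cases hfound : pos = -1
    · rw [if_pos hfound, if_pos hfound]
    · rw [if_neg hfound, if_neg hfound]
      have hge : 0 ≤ pos := by
        have := PySem.Chars.neg_one_le_find runA norm
        rw [hpos] at this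
        omega
      have hle : pos ≤ runA.length := by
        have := PySem.Chars.find_le_length runA norm
        rw [hpos] at this
        exact this
      obtain ⟨hpref, -⟩ := PySem.Chars.find_spec (s := runA) (sub := norm) (by rw [hpos]; exact hge)
      rw [hpos] at hpref
      obtain ⟨p, hposp⟩ : ∃ m : Nat, pos = (m : Int) := ⟨pos.toNat, (Int.toNat_of_nonneg hge).symm⟩
      have hptn : pos.toNat = p := by omega
      rw [hptn] at hpref
      have hLpos : 0 < norm.length := List.length_pos_iff.mpr hne
      have hplen : p + norm.length ≤ runA.length := by
        have h' := hpref.length_le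
        simp at h'
        omega
      -- the two end characters of the match are non-space, hence lie inside line intervals
      have hchar0 : runA[p]'(by omega) = norm[0]'(by omega) := by
        have h' := (List.IsPrefix.getElem hpref (i := 0) (by omega)).symm
        rw [List.getElem_drop] at h'
        simpa using h'
      have hcharL : runA[p + (norm.length - 1)]'(by omega) = norm[norm.length - 1]'(by omega) := by
        have h' := (List.IsPrefix.getElem hpref (i := norm.length - 1) (by omega)).symm
        rw [List.getElem_drop] at h'
        exact h'
      have hends : PySem.Chars.isspace (norm[0]'(by omega)) = false ∧
          PySem.Chars.isspace (norm[norm.length - 1]'(by omega)) = false := by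
        refine pv_norm_ends needle _ _ ?_ ?_
        · rw [hnorm, List.head?_eq_getElem?, List.getElem?_eq_getElem]
        · rw [hnorm, List.getLast?_eq_getElem?, List.getElem?_eq_getElem]
      have hsp : PySem.Chars.isspace ' ' = true := by decide
      obtain ⟨j, hj, hj1, hj2⟩ : ∃ j, ∃ (hj : j < lps.length), lps[j].1 ≤ p ∧ p < lps[j].2 := by
        rcases h5 p (by omega) with h | h
        · exact h
        · rw [hchar0] at h
          rw [h] at hends
          simp [hsp] at hends
      obtain ⟨k, hk, hk1, hk2⟩ : ∃ k, ∃ (hk : k < lps.length),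
          lps[k].1 ≤ p + (norm.length - 1) ∧ p + (norm.length - 1) < lps[k].2 := by
        rcases h5 (p + (norm.length - 1)) (by omega) with h | h
        · exact h
        · rw [hcharL] at h
          rw [h] at hends
          simp [hsp] at hends
      have hjk : j ≤ k := by
        by_contra hlt
        have := h3 k j hk hj (by omega)
        omega
      have hwin := pvScanA_window lps pos (pos + (norm.length : Int)) j k hk hjk ?hP
      case hP =>
        intro t ht
        constructor
        · rintro ⟨hgt, hlt⟩
          rw [hposp] at hgt hlt
          constructor
          · by_contra htj
            have h0 := h3 t j (by omega) hj (by omega)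
            omega
          · by_contra htk
            have h0 := h3 k t hk (by omega) (by omega)
            omega
        · rintro ⟨hjt, htk⟩
          rw [hposp]
          have ht2 := h2 t ht
          constructor
          · rcases Nat.eq_or_lt_of_le hjt with he | hlt
            · subst he; omega
            · have h0 := h3 j t hj ht hlt
              omega
          · rcases Nat.eq_or_lt_of_le htk with he | hlt
            · subst he; omega
            · have h0 := h3 t k ht hk hlt
              have hk2' := (h2 k hk).1
              omega
      rw [hwin]
      rw [hposp]
      have hidx : (p : Int) + (norm.length : Int) - 1 = ((p + (norm.length - 1) : Nat) : Int) := by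
        omega
      rw [hidx]
      rw [PySem.List.pyGetD_natCast, PySem.List.pyGetD_natCast]
      rw [List.getD_eq_getElem?_getD, List.getD_eq_getElem?_getD]
      rw [h4 j hj p hj1 hj2, h4 k hk (p + (norm.length - 1)) hk1 hk2]
      simp
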